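-- pv_equiv track=rewrite | github.com/KotaNakajima/dji-waypoint-maker | lib/csv_parser.py | detect_identifier_columns
-- ===== SOURCE A (Python) =====
-- def detect_identifier_columns(header_row):
--     """
--     Detect SerialNumb or plot_id columns in the header row.
--     Returns a tuple (serial_numb_index, plot_id_index) or (None, None) if not found.
--     SerialNumb takes priority over plot_id if both exist.
--     """
--     serial_numb_index = None
--     plot_id_index = None
--
--     if header_row:
--         # Convert to lowercase for case-insensitive comparison
--         header_lower = [col.lower().strip() for col in header_row]
--
--         # Look for SerialNumb variations
--         serial_variations = ['serialnumb', 'serial_numb', 'serialnumber', 'serial_number', 'serial']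
--         for i, col in enumerate(header_lower):
--             if col in serial_variations:
--                 serial_numb_index = i
--                 break
--
--         # Look for plot_id variations
--         plot_variations = ['plot_id', 'plotid', 'plot', 'id']
--         for i, col in enumerate(header_lower):
--             if col in plot_variations:
--                 plot_id_index = i
--                 break
--
--     return serial_numb_index, plot_id_index
-- ===== SOURCE B (Python) =====
-- def detect_identifier_columns(header_row):
--     """Single pass over the header: check each normalized column against both
--     variation sets, record first hits, stop once both are found."""
--     SERIAL_VARIATIONS = frozenset(
--         ['serialnumb', 'serial_numb', 'serialnumber', 'serial_number', 'serial'])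
--     PLOT_VARIATIONS = frozenset(['plot_id', 'plotid', 'plot', 'id'])
--     serial_numb_index = None
--     plot_id_index = None
--     for i, col in enumerate(header_row):
--         c = col.lower().strip()
--         if serial_numb_index is None and c in SERIAL_VARIATIONS:
--             serial_numb_index = i
--         if plot_id_index is None and c in PLOT_VARIATIONS:
--             plot_id_index = i
--         if serial_numb_index is not None and plot_id_index is not None:
--             break
--     return serial_numb_index, plot_id_index
-- ===== Notes on version B (the rewrite author's own statement) =====
-- stated objective: alternative
-- what changed: Replaced A's normalize-the-whole-header pass plus two separate index scans by one single pass that normalizes each column on the fly, records the first serial and first plot hit independently, and stops early once both are found.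
import Mathlib
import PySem

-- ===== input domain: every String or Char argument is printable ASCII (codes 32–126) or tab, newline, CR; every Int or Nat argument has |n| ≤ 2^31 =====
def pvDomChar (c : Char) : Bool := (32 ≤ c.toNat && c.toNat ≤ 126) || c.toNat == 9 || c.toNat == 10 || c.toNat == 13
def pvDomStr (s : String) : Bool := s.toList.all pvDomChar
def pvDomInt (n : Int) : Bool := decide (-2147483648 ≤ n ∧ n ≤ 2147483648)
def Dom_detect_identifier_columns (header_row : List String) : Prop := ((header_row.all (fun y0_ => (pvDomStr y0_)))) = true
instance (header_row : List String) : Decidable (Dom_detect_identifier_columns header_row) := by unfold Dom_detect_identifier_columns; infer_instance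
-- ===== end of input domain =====

-- B is an alternative single-pass decomposition of A (same cost): one loop that normalizes
-- each column on the fly and records both first hits, instead of a normalization pass plus
-- two separate scans.

-- ===== PORT A =====
-- serial_variations / plot_variations (A's literal lists)
def pvSerialVariations : List String :=
  ["serialnumb", "serial_numb", "serialnumber", "serial_number", "serial"]
def pvPlotVariations : List String :=
  ["plot_id", "plotid", "plot", "id"]

-- 'for i, col in enumerate(header_lower): if col in variations: idx = i; break'
def pvScanA (variations : List String) (cols : List String) (i : Int) : Option Int :=
  match cols with
  | [] => none
  | col :: rest => if col ∈ variations then some i else pvScanA variations rest (i + 1)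

def detect_identifier_columns (header_row : List String) : Option Int × Option Int :=
  -- serial_numb_index = None; plot_id_index = None; if header_row: …
  if header_row = [] then (none, none)
  else
    let header_lower := header_row.map (fun col => PySem.Str.strip (PySem.Str.lower col))
    (pvScanA pvSerialVariations header_lower 0, pvScanA pvPlotVariations header_lower 0)

-- ===== PORT B =====
-- B's frozensets
def pvSerialSet : PySem.Set String :=
  PySem.Set.ofList ["serialnumb", "serial_numb", "serialnumber", "serial_number", "serial"]
def pvPlotSet : PySem.Set String :=
  PySem.Set.ofList ["plot_id", "plotid", "plot", "id"]

-- B's single loop: normalize, record first hits, break once both are found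
def pvLoopB (cols : List String) (i : Int) (s p : Option Int) : Option Int × Option Int :=
  match cols with
  | [] => (s, p)
  | col :: rest =>
    let c := PySem.Str.strip (PySem.Str.lower col)
    let s' := if s = none ∧ c ∈ pvSerialSet then some i else s
    let p' := if p = none ∧ c ∈ pvPlotSet then some i else p
    if s' ≠ none ∧ p' ≠ none then (s', p') else pvLoopB rest (i + 1) s' p'

def detect_identifier_columns_alt (header_row : List String) : Option Int × Option Int :=
  pvLoopB header_row 0 none none

-- ===== PRECONDITION & SPEC =====
def Spec_detect_identifier_columns (header_row : List String) (out : Option Int × Option Int) : Prop := out = detect_identifier_columns_alt header_row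
instance (header_row : List String) (out : Option Int × Option Int) : Decidable (Spec_detect_identifier_columns header_row out) := by unfold Spec_detect_identifier_columns; infer_instance

-- ===== CLAIM (what is proved, stated in full; the proofs are below) =====
def Claim_equal_detect_identifier_columns : Prop := ∀ (header_row : List String), Dom_detect_identifier_columns header_row → Spec_detect_identifier_columns header_row (detect_identifier_columns header_row)

-- ===== LEMMAS AND PROOFS =====

-- the frozensets hold exactly A's variation lists
theorem pvSerialSet_eq : pvSerialSet = pvSerialVariations := by decide
theorem pvPlotSet_eq : pvPlotSet = pvPlotVariations := by decide

-- B's single pass computes both of A's scans (accumulators already found are kept)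
theorem pvLoopB_eq (cols : List String) (i : Int) (s p : Option Int) :
    pvLoopB cols i s p =
      (s.rec (pvScanA pvSerialVariations (cols.map (fun col => PySem.Str.strip (PySem.Str.lower col))) i) (fun v => some v),
       p.rec (pvScanA pvPlotVariations (cols.map (fun col => PySem.Str.strip (PySem.Str.lower col))) i) (fun v => some v)) := by
  induction cols generalizing i s p with
  | nil => cases s <;> cases p <;> simp [pvLoopB, pvScanA]
  | cons col rest ih =>
    simp only [pvLoopB, pvSerialSet_eq, pvPlotSet_eq, List.map_cons, pvScanA]
    cases s <;> cases p <;>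
      by_cases hs : PySem.Str.strip (PySem.Str.lower col) ∈ pvSerialVariations <;>
      by_cases hp : PySem.Str.strip (PySem.Str.lower col) ∈ pvPlotVariations <;>
      simp [hs, hp, ih]

-- ===== VERDICT (by name: the statement is the Claim_ definition above) =====
theorem detect_identifier_columns_spec : Claim_equal_detect_identifier_columns := by
  intro header_row _
  show detect_identifier_columns header_row = detect_identifier_columns_alt header_row
  unfold detect_identifier_columns detect_identifier_columns_alt
  rw [pvLoopB_eq]
  cases header_row with
  | nil => simp [pvScanA]
  | cons c rest => simp
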